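-- pv_equiv track=rewrite | github.com/kushagra-gtme/serper-find-offline-business | scripts/lib/locations.py | filter_cities_by_states
-- ===== SOURCE A (Python) =====
-- from typing import List, Dict, Optional
--
-- def filter_cities_by_states(
--     cities: List[Dict[str, str]],
--     states: List[str],
--     limit_per_state: Optional[int] = None,
-- ) -> List[str]:
--     """Filter cities matching the given states. Optionally limit per state."""
--     states_lower = [s.lower() for s in states]
--     state_buckets: Dict[str, List[str]] = {s: [] for s in states_lower}
--
--     for city in cities:
--         city_str = city.get("city", "") or city.get("location", "")
--         for state in states_lower:
--             if state in city_str.lower():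
--                 state_buckets[state].append(city_str)
--                 break
--
--     result = []
--     for state in states_lower:
--         bucket = state_buckets[state]
--         if limit_per_state:
--             result.extend(bucket[:limit_per_state])
--         else:
--             result.extend(bucket)
--
--     return result
-- ===== SOURCE B (Python) =====
-- from typing import List, Dict, Optional
--
-- def filter_cities_by_states(
--     cities: List[Dict[str, str]],
--     states: List[str],
--     limit_per_state: Optional[int] = None,
-- ) -> List[str]:
--     """Two-phase: tag every city once with its first matching state, then emit per state."""
--     states_lower = [s.lower() for s in states]
--     tagged = []
--     for city in cities:
--         city_str = city.get("city", "") or city.get("location", "")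
--         low = city_str.lower()
--         tag = next((s for s in states_lower if s in low), None)
--         tagged.append((tag, city_str))
--     out = []
--     for state in states_lower:
--         bucket = [cs for (t, cs) in tagged if t == state]
--         out.extend(bucket[:limit_per_state] if limit_per_state else bucket)
--     return out
-- ===== Notes on version B (the rewrite author's own statement) =====
-- stated objective: alternative
-- what changed: Replaces A's incremental dict-of-buckets (initialised per state, appended to city-by-city, then drained) by a two-phase scheme: one pass tags each city with its first matching lowered state (lowercasing the city once), then a per-state comprehension over the tagged list emits each bucket.
import Mathlib
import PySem

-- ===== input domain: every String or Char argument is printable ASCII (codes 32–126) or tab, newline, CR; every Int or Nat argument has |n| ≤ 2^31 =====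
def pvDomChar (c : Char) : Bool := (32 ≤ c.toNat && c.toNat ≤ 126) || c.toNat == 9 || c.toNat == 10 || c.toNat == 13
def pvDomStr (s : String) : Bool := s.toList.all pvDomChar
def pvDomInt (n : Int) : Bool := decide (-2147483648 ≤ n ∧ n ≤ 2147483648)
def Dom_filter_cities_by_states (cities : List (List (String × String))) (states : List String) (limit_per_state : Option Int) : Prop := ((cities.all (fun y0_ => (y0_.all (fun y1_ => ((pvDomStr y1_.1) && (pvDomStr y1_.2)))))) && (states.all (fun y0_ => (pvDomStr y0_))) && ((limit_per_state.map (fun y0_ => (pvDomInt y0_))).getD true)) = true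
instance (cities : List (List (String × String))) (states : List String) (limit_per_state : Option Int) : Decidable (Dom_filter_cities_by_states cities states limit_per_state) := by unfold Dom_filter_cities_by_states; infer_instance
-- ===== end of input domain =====

-- B replaces A's incremental dict-of-buckets by a two-phase tag-then-emit scheme (alternative, similar cost).

-- shared by both ports (both Pythons contain the identical expression):
-- city.get("city", "") or city.get("location", "")
def fcbsCityStr (city : List (String × String)) : String :=
  let a := (PySem.Dict.mk city).getD "city" ""
  if a == "" then (PySem.Dict.mk city).getD "location" "" else a

-- ===== PORT A =====
-- A's inner 'for state in states_lower: … break' over one city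
def fcbsAssign (sl : List String) (d : PySem.Dict String (List String)) (cs : String) : PySem.Dict String (List String) :=
  match sl with
  | [] => d
  | s :: rest =>
      if PySem.Str.isIn s (PySem.Str.lower cs) then d.modify s [] (· ++ [cs])
      else fcbsAssign rest d cs

def filter_cities_by_states (cities : List (List (String × String))) (states : List String) (limit_per_state : Option Int) : List String :=
  let sl := states.map PySem.Str.lower
  let buckets0 := sl.foldl (fun d s => d.insert s ([] : List String)) PySem.Dict.empty
  let buckets := cities.foldl (fun d city => fcbsAssign sl d (fcbsCityStr city)) buckets0
  sl.foldl (fun res s =>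
    let bucket := buckets.getD s []
    match limit_per_state with
    | some n => if n ≠ 0 then res ++ PySem.List.slice bucket none (some n) else res ++ bucket
    | none => res ++ bucket) []

-- ===== PORT B =====
-- next((s for s in sl if s in low), None)
def fcbsTag (sl : List String) (low : String) : Option String :=
  sl.find? (fun s => PySem.Str.isIn s low)

def filter_cities_by_states_alt (cities : List (List (String × String))) (states : List String) (limit_per_state : Option Int) : List String :=
  let sl := states.map PySem.Str.lower
  let tagged := cities.map (fun city =>
    let cs := fcbsCityStr city
    (fcbsTag sl (PySem.Str.lower cs), cs))
  sl.foldl (fun out s =>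
    let bucket := (tagged.filter (fun p => p.1 == some s)).map (·.2)
    match limit_per_state with
    | some n => if n ≠ 0 then out ++ PySem.List.slice bucket none (some n) else out ++ bucket
    | none => out ++ bucket) []

-- ===== PRECONDITION & SPEC =====
def Spec_filter_cities_by_states (cities : List (List (String × String))) (states : List String) (limit_per_state : Option Int) (out : List String) : Prop := out = filter_cities_by_states_alt cities states limit_per_state
instance (cities : List (List (String × String))) (states : List String) (limit_per_state : Option Int) (out : List String) : Decidable (Spec_filter_cities_by_states cities states limit_per_state out) := by unfold Spec_filter_cities_by_states; infer_instance

-- ===== CLAIM (what is proved, stated in full; the proofs are below) =====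
def Claim_equal_filter_cities_by_states : Prop := ∀ (cities : List (List (String × String))) (states : List String) (limit_per_state : Option Int), Dom_filter_cities_by_states cities states limit_per_state → Spec_filter_cities_by_states cities states limit_per_state (filter_cities_by_states cities states limit_per_state)

-- ===== LEMMAS AND PROOFS =====

-- the one-city dict update is 'modify at the first matching state, if any'
theorem fcbsAssign_eq (sl : List String) (d : PySem.Dict String (List String)) (cs : String) :
    fcbsAssign sl d cs =
      match fcbsTag sl (PySem.Str.lower cs) with
      | some t => d.modify t [] (· ++ [cs])
      | none => d := by
  induction sl with
  | nil => simp [fcbsAssign, fcbsTag]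
  | cons s rest ih =>
      cases h : PySem.Chars.isIn s.toList (PySem.Chars.lower cs.toList) <;>
        simp [fcbsAssign, fcbsTag, List.find?, h, ih]

-- the bucket of s after the tagged fold is the old bucket plus the cities tagged s
theorem fcbsTagFold_getD (l : List (Option String × String))
    (d : PySem.Dict String (List String)) (s : String) :
    (l.foldl (fun d p =>
        match p.1 with
        | some t => d.modify t [] (· ++ [p.2])
        | none => d) d).getD s []
      = d.getD s [] ++ (l.filter (fun p => p.1 == some s)).map (·.2) := by
  induction l generalizing d with
  | nil => simp
  | cons p rest ih =>
      obtain ⟨t?, cs⟩ := p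
      cases t? with
      | none => simp [ih]
      | some t =>
          simp only [List.foldl_cons, ih, List.filter_cons]
          by_cases h : t = s
          · subst h
            simp
          · have hbe : ((some t : Option String) == some s) = false := by
              simp [h]
            simp only [hbe]
            rw [PySem.Dict.getD_modify, if_neg (fun hst => h hst.symm)]
            simp

-- every bucket of the initial dict {s: [] for s in sl} is []
theorem fcbsInit_getD (sl : List String) (d : PySem.Dict String (List String))
    (h : ∀ s, d.getD s [] = []) (s : String) :
    (sl.foldl (fun d s => d.insert s ([] : List String)) d).getD s [] = [] := by
  induction sl generalizing d with
  | nil => simpa using h s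
  | cons x rest ih =>
      simp only [List.foldl_cons]
      exact ih _ (fun s' => by
        by_cases hx : s' = x
        · subst hx; simp [PySem.Dict.getD_insert_self]
        · rw [PySem.Dict.getD_insert, if_neg hx]; exact h s')

-- ===== VERDICT (by name: the statement is the Claim_ definition above) =====
theorem filter_cities_by_states_spec : Claim_equal_filter_cities_by_states := by
  intro cities states limit_per_state _
  unfold Spec_filter_cities_by_states filter_cities_by_states filter_cities_by_states_alt
  simp only []
  apply PySem.List.foldl_congr_mem
  intro acc s _
  have hbuckets :
      (cities.foldl (fun d city => fcbsAssign (states.map PySem.Str.lower) d (fcbsCityStr city))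
          ((states.map PySem.Str.lower).foldl (fun d s => d.insert s ([] : List String))
            PySem.Dict.empty)).getD s []
        = ((cities.map (fun city =>
              (fcbsTag (states.map PySem.Str.lower) (PySem.Str.lower (fcbsCityStr city)),
                fcbsCityStr city))).filter (fun p => p.1 == some s)).map (·.2) := by
    have hfold : ∀ d0 : PySem.Dict String (List String),
        cities.foldl (fun d city => fcbsAssign (states.map PySem.Str.lower) d (fcbsCityStr city)) d0
          = (cities.map (fun city =>
              (fcbsTag (states.map PySem.Str.lower) (PySem.Str.lower (fcbsCityStr city)),
                fcbsCityStr city))).foldl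
              (fun d p =>
                match p.1 with
                | some t => d.modify t [] (· ++ [p.2])
                | none => d) d0 := by
      intro d0
      rw [List.foldl_map]
      apply PySem.List.foldl_congr_mem
      intro d city _
      exact fcbsAssign_eq _ d _
    rw [hfold _, fcbsTagFold_getD,
        fcbsInit_getD _ PySem.Dict.empty (fun s' => by simp [PySem.Dict.getD_empty])]
    simp
  rw [hbuckets]
  cases limit_per_state <;> rfl
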